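-- pv_equiv track=rewrite | github.com/EndavaOrg/scrapers- | scripts/avtonet_car_scraper.py | check_special_make
-- ===== SOURCE A (Python) =====
-- def check_special_make(name_parts: list[str]) -> str | None:
--     if not name_parts:
--         return None
--
--     multi_word_makes = {
--         ("Land", "Rover"): "Land Rover",
--         ("Alfa", "Romeo"): "Alfa Romeo",
--         ("Aston", "Martin"): "Aston Martin",
--         ("Rolls", "Royce"): "Rolls Royce",
--         ("DS", "Automobiles"): "DS Automobiles"
--     }
--
--     for key_tuple, full_make in multi_word_makes.items():
--         if name_parts[:len(key_tuple)] == list(key_tuple):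
--             return full_make
--
--     return name_parts[0]
-- ===== SOURCE B (Python) =====
-- def check_special_make(name_parts: list[str]) -> str | None:
--     if not name_parts:
--         return None
--
--     # Keyed by first word only; the value is the expected SECOND word.
--     # The full make name is rebuilt by concatenation, not stored.
--     expected_second = {
--         "Land": "Rover",
--         "Alfa": "Romeo",
--         "Aston": "Martin",
--         "Rolls": "Royce",
--         "DS": "Automobiles",
--     }
--
--     first = name_parts[0]
--     if len(name_parts) >= 2 and expected_second.get(first) == name_parts[1]:
--         return first + " " + name_parts[1]
--     return first
-- ===== Notes on version B (the rewrite author's own statement) =====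
-- stated objective: alternative
-- what changed: Instead of scanning five 2-tuple keys with a slice-and-compare each, B indexes by the first word alone (mapping it to the expected second word) and rebuilds the full make via string concatenation; the stored full names and the per-entry scan disappear.
import Mathlib
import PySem

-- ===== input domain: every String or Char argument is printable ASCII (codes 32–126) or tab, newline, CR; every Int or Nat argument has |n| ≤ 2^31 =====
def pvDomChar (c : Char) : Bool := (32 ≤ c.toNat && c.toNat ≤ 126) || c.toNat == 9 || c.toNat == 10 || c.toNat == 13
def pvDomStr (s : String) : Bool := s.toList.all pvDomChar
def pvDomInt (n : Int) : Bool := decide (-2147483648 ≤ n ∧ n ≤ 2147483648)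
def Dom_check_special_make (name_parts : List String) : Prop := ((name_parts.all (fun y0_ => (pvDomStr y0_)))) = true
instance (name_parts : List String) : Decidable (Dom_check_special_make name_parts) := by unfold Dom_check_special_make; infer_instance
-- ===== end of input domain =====

-- B indexes by the first word alone (mapping it to the expected second word) and
-- rebuilds the full make by concatenation; A's per-entry scan over 2-tuple keys and
-- the stored full names disappear (alternative, same return value).

-- ===== PORT A =====
-- the dict literal, in insertion order
def pvMakes : List ((String × String) × String) :=
  [(("Land", "Rover"), "Land Rover"),
   (("Alfa", "Romeo"), "Alfa Romeo"),
   (("Aston", "Martin"), "Aston Martin"),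
   (("Rolls", "Royce"), "Rolls Royce"),
   (("DS", "Automobiles"), "DS Automobiles")]

-- the for-loop over multi_word_makes.items(): compare name_parts[:len(key)] (= take 2,
-- every key has length 2) with list(key); fall through to name_parts[0]
def pvScan (ps : List String) : List ((String × String) × String) → Option String
  | [] => ps.head?            -- return name_parts[0] (ps nonempty when reached)
  | ((k1, k2), full) :: rest =>
      if ps.take 2 = [k1, k2] then some full else pvScan ps rest

def check_special_make (name_parts : List String) : Option String :=
  if name_parts = [] then none
  else pvScan name_parts pvMakes

-- ===== PORT B =====
-- dict keyed by the first word only; value = the expected second word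
def pvSecond : PySem.Dict String String :=
  PySem.Dict.ofList
    [("Land", "Rover"), ("Alfa", "Romeo"), ("Aston", "Martin"),
     ("Rolls", "Royce"), ("DS", "Automobiles")]

def check_special_make_alt (name_parts : List String) : Option String :=
  match name_parts with
  | [] => none
  | first :: rest =>
      match rest with
      | [] => some first                       -- len(name_parts) >= 2 fails
      | second :: _ =>
          if PySem.Dict.get? pvSecond first = some second
          then some (first ++ " " ++ second)   -- first + " " + name_parts[1]
          else some first

-- ===== PRECONDITION & SPEC =====
def Spec_check_special_make (name_parts : List String) (out : Option String) : Prop := out = check_special_make_alt name_parts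
instance (name_parts : List String) (out : Option String) : Decidable (Spec_check_special_make name_parts out) := by unfold Spec_check_special_make; infer_instance

-- ===== CLAIM (what is proved, stated in full; the proofs are below) =====
def Claim_equal_check_special_make : Prop := ∀ (name_parts : List String), Dom_check_special_make name_parts → Spec_check_special_make name_parts (check_special_make name_parts)

-- ===== LEMMAS AND PROOFS =====

-- ===== VERDICT (by name: the statement is the Claim_ definition above) =====
set_option maxRecDepth 10000 in
theorem check_special_make_spec : Claim_equal_check_special_make := by
  intro ps hd
  clear hd
  unfold Spec_check_special_make check_special_make check_special_make_alt
  match ps with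
  | [] => rfl
  | [x] =>
      simp only [pvScan, pvMakes, if_neg (by simp : ¬([x] : List String) = [])]
      simp [List.take]
  | x :: y :: rest =>
      simp only [if_neg (by simp : ¬(x :: y :: rest : List String) = [])]
      simp only [pvScan, pvMakes, List.take, List.cons.injEq, and_true]
      have hd : pvSecond = PySem.Dict.mk
          [("Land", "Rover"), ("Alfa", "Romeo"), ("Aston", "Martin"),
           ("Rolls", "Royce"), ("DS", "Automobiles")] := by decide
      rw [hd]
      simp only [PySem.Dict.get?_mk_cons, beq_iff_eq]
      by_cases h1 : x = "Land" ∧ y = "Rover"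
      · obtain ⟨hx, hy⟩ := h1; subst hx hy
        rfl
      all_goals rw [if_neg h1]
      by_cases h2 : x = "Alfa" ∧ y = "Romeo"
      · obtain ⟨hx, hy⟩ := h2; subst hx hy
        rfl
      all_goals rw [if_neg h2]
      by_cases h3 : x = "Aston" ∧ y = "Martin"
      · obtain ⟨hx, hy⟩ := h3; subst hx hy
        rfl
      all_goals rw [if_neg h3]
      by_cases h4 : x = "Rolls" ∧ y = "Royce"
      · obtain ⟨hx, hy⟩ := h4; subst hx hy
        rfl
      all_goals rw [if_neg h4]
      by_cases h5 : x = "DS" ∧ y = "Automobiles"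
      · obtain ⟨hx, hy⟩ := h5; subst hx hy
        rfl
      all_goals rw [if_neg h5]
      -- A returns name_parts[0]; show B's lookup on x never matches y here
      simp only [List.head?]
      by_cases e1 : "Land" = x
      · subst e1; rw [if_pos rfl,
          if_neg (fun h => h1 ⟨rfl, (Option.some.inj h).symm⟩)]
      rw [if_neg e1]
      by_cases e2 : "Alfa" = x
      · subst e2; rw [if_pos rfl,
          if_neg (fun h => h2 ⟨rfl, (Option.some.inj h).symm⟩)]
      rw [if_neg e2]
      by_cases e3 : "Aston" = x
      · subst e3; rw [if_pos rfl,
          if_neg (fun h => h3 ⟨rfl, (Option.some.inj h).symm⟩)]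
      rw [if_neg e3]
      by_cases e4 : "Rolls" = x
      · subst e4; rw [if_pos rfl,
          if_neg (fun h => h4 ⟨rfl, (Option.some.inj h).symm⟩)]
      rw [if_neg e4]
      by_cases e5 : "DS" = x
      · subst e5; rw [if_pos rfl,
          if_neg (fun h => h5 ⟨rfl, (Option.some.inj h).symm⟩)]
      rw [if_neg e5]
      simp [PySem.Dict.get?]
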